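-- pv_equiv track=rewrite | github.com/Park-Minjoo/CODINGTEST_STUDY | PCCP/외톨이 알파벳/Minjoo Park.py | solution
-- ===== SOURCE A (Python) =====
-- def solution(input_string):
--     answer = ''
--     count = {}
--     answer_list = []
--     for idx, alpha in enumerate(input_string):
--         if alpha not in count:
--             count[alpha] = [idx]
--         else:
--             count[alpha].append(idx)
--
--     for key, value in count.items():
--         if len(value) >= 2:
--             for i in range(len(value) - 1):
--                 if abs(value[i] - value[i+1]) > 1:
--                     answer_list.append(key)
--                     break
--
--     if len(answer_list) == 0:
--         answer = "N"
--     else: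
--         answer = ''.join(sorted(answer_list))
--
--     return answer
-- ===== SOURCE B (Python) =====
-- def solution(input_string):
--     last = {}
--     lonely = set()
--     for idx, ch in enumerate(input_string):
--         if ch in last and idx - last[ch] > 1:
--             lonely.add(ch)
--         last[ch] = idx
--     return ''.join(sorted(lonely)) if lonely else "N"
-- ===== Notes on version B (the rewrite author's own statement) =====
-- stated objective: simpler
-- what changed: Single pass that keeps only each character's most recent index and a set of lonely letters, eliminating A's intermediate dict of full position lists and its whole second nested pass over adjacent gaps.
import Mathlib
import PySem

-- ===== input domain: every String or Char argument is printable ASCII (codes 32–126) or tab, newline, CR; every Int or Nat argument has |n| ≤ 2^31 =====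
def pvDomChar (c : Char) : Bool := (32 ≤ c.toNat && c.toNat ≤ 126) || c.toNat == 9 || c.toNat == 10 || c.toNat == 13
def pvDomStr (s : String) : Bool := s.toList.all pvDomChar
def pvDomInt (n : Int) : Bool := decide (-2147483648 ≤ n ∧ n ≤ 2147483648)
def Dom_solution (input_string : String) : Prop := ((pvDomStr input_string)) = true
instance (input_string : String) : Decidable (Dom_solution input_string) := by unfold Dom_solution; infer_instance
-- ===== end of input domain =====

-- B replaces A's dict of full position lists plus a second nested gap-scanning pass by one pass
-- that remembers only each character's most recent index and a set of lonely letters (objective: simpler).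

-- ===== PORT A =====
def solution (input_string : String) : String :=
  let count := (PySem.List.enumerate input_string.toList 0).foldl
    (fun d p => if d.contains p.2 then d.modify p.2 [] (fun l => l ++ [p.1]) else d.insert p.2 [p.1])
    PySem.Dict.empty
  let answer_list := count.items.foldl
    (fun acc kv =>
      if 2 ≤ kv.2.length then
        if (PySem.List.pyRange 0 ((kv.2.length : Int) - 1) 1).any
            (fun i => decide (1 < (PySem.List.pyGetD kv.2 i 0 - PySem.List.pyGetD kv.2 (i + 1) 0).natAbs)) then
          acc ++ [kv.1]
        else acc
      else acc)
    ([] : List Char)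
  if answer_list.length = 0 then "N"
  else String.ofList (PySem.List.sorted answer_list (fun x => x) false)

-- ===== PORT B =====
def solution_alt (input_string : String) : String :=
  let st := (PySem.List.enumerate input_string.toList 0).foldl
    (fun (st : PySem.Dict Char Int × PySem.Set Char) p =>
      let lonely := if st.1.contains p.2 && decide (1 < p.1 - st.1.getD p.2 0) then st.2.add p.2 else st.2
      (st.1.insert p.2 p.1, lonely))
    (PySem.Dict.empty, PySem.Set.empty)
  if st.2 = [] then "N"
  else String.ofList (PySem.List.sorted st.2 (fun x => x) false)

-- ===== PRECONDITION & SPEC =====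
def Spec_solution (input_string : String) (out : String) : Prop := out = solution_alt input_string
instance (input_string : String) (out : String) : Decidable (Spec_solution input_string out) := by unfold Spec_solution; infer_instance

-- ===== CLAIM (what is proved, stated in full; the proofs are below) =====
def Claim_equal_solution : Prop := ∀ (input_string : String), Dom_solution input_string → Spec_solution input_string (solution input_string)

-- ===== LEMMAS AND PROOFS =====

/-- The positions (in order) at which `c` occurs among the enumerated pairs `p`. -/
def posL (p : List (Int × Char)) (c : Char) : List Int :=
  (p.filter (fun q => q.2 == c)).map (fun q => q.1)

/-- Some adjacent pair of the list has gap > 1. -/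
def hasGap : List Int → Bool
  | a :: b :: t => decide (1 < b - a) || hasGap (b :: t)
  | _ => false

/-- A's inner check on a position list: length ≥ 2 and some adjacent |difference| > 1. -/
def condA (v : List Int) : Bool :=
  decide (2 ≤ v.length) &&
    (PySem.List.pyRange 0 ((v.length : Int) - 1)).any
      (fun i => decide (1 < (PySem.List.pyGetD v i 0 - PySem.List.pyGetD v (i + 1) 0).natAbs))

/-- B's fold step, named for the proofs (definitionally the step inside `solution_alt`). -/
def stepB (st : PySem.Dict Char Int × PySem.Set Char) (p : Int × Char) :
    PySem.Dict Char Int × PySem.Set Char :=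
  let lonely := if st.1.contains p.2 && decide (1 < p.1 - st.1.getD p.2 0) then st.2.add p.2 else st.2
  (st.1.insert p.2 p.1, lonely)

theorem posL_append (p q : List (Int × Char)) (c : Char) :
    posL (p ++ q) c = posL p c ++ posL q c := by
  simp [posL]

theorem posL_singleton (i : Int) (a c : Char) :
    posL [(i, a)] c = if a = c then [i] else [] := by
  by_cases h : a = c <;> simp [posL, h]

theorem posL_ne_nil (l : List (Int × Char)) (c : Char) :
    posL l c ≠ [] ↔ c ∈ l.map (fun q => q.2) := by
  simp [posL]

theorem hasGap_snoc (v : List Int) (i : Int) :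
    hasGap (v ++ [i]) = (hasGap v || (!v.isEmpty && decide (1 < i - v.getLastD 0))) := by
  induction v with
  | nil => simp [hasGap]
  | cons a t ih =>
    cases t with
    | nil => simp [hasGap]
    | cons b t2 =>
      have h1 : hasGap (a :: b :: t2 ++ [i]) = (decide (1 < b - a) || hasGap (b :: t2 ++ [i])) := by
        cases t2 <;> simp [hasGap]
      have h2 : hasGap (a :: b :: t2) = (decide (1 < b - a) || hasGap (b :: t2)) := by
        simp [hasGap]
      rw [h1, ih, h2]
      simp [Bool.or_assoc]

theorem hasGap_iff (v : List Int) :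
    hasGap v = true ↔ ∃ k : Nat, ∃ h : k + 1 < v.length, 1 < v[k + 1] - v[k] := by
  induction v with
  | nil => simp [hasGap]
  | cons a t ih =>
    cases t with
    | nil => simp [hasGap]
    | cons b t2 =>
      have h2 : hasGap (a :: b :: t2) = (decide (1 < b - a) || hasGap (b :: t2)) := by
        simp [hasGap]
      rw [h2]
      simp only [Bool.or_eq_true, decide_eq_true_eq, ih]
      constructor
      · rintro (h | ⟨k, hk, hg⟩)
        · exact ⟨0, by simp, by simpa using h⟩
        · exact ⟨k + 1, by simpa using hk, by simpa using hg⟩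
      · rintro ⟨k, hk, hg⟩
        cases k with
        | zero => exact Or.inl (by simpa using hg)
        | succ k => exact Or.inr ⟨k, by simpa using hk, by simpa using hg⟩

theorem condA_eq_hasGap (v : List Int) (h : v.Pairwise (· < ·)) : condA v = hasGap v := by
  rw [Bool.eq_iff_iff, hasGap_iff]
  unfold condA
  simp only [Bool.and_eq_true, decide_eq_true_eq, List.any_eq_true, PySem.List.mem_pyRange_one]
  have hpw := List.pairwise_iff_getElem.mp h
  constructor
  · rintro ⟨hlen, i, ⟨hi0, hilt⟩, hd⟩
    lift i to ℕ using hi0 with k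
    have hk1 : k + 1 < v.length := by omega
    refine ⟨k, hk1, ?_⟩
    have e1 : PySem.List.pyGetD v (k : Int) 0 = v[k] := by
      rw [PySem.List.pyGetD_natCast, List.getD_eq_getElem?_getD, List.getElem?_eq_getElem (by omega)]
      rfl
    have e2 : PySem.List.pyGetD v ((k : Int) + 1) 0 = v[k + 1] := by
      have : (k : Int) + 1 = ((k + 1 : ℕ) : Int) := by push_cast; ring
      rw [this, PySem.List.pyGetD_natCast, List.getD_eq_getElem?_getD, List.getElem?_eq_getElem hk1]
      rfl
    rw [e1, e2] at hd
    have hlt : v[k] < v[k + 1] := hpw k (k + 1) (by omega) hk1 (by omega)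
    omega
  · rintro ⟨k, hk1, hg⟩
    refine ⟨by omega, (k : Int), ⟨by positivity, by omega⟩, ?_⟩
    have e1 : PySem.List.pyGetD v (k : Int) 0 = v[k] := by
      rw [PySem.List.pyGetD_natCast, List.getD_eq_getElem?_getD, List.getElem?_eq_getElem (by omega)]
      rfl
    have e2 : PySem.List.pyGetD v ((k : Int) + 1) 0 = v[k + 1] := by
      have : (k : Int) + 1 = ((k + 1 : ℕ) : Int) := by push_cast; ring
      rw [this, PySem.List.pyGetD_natCast, List.getD_eq_getElem?_getD, List.getElem?_eq_getElem hk1]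
      rfl
    rw [e1, e2]
    have hlt : v[k] < v[k + 1] := hpw k (k + 1) (by omega) hk1 (by omega)
    omega

-- ===== A-side: the grouped dict =====

theorem stepA_eq (d : PySem.Dict Char (List Int)) (p : Int × Char) :
    (if d.contains p.2 then d.modify p.2 [] (fun l => l ++ [p.1]) else d.insert p.2 [p.1])
      = d.modify p.2 [] (fun l => l ++ [p.1]) := by
  by_cases h : d.contains p.2
  · simp [h]
  · have hn : d.get? p.2 = none := by
      rw [PySem.Dict.get?_eq_none_iff_not_mem_keys]
      intro hm
      exact h (by rw [PySem.Dict.contains_eq_decide_mem_keys]; simpa using hm)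
    simp [h, PySem.Dict.modify, PySem.Dict.getD, hn]

theorem foldA_eq (p : List (Int × Char)) (e : PySem.Dict Char (List Int)) :
    (p.foldl (fun d q => if d.contains q.2 then d.modify q.2 [] (fun l => l ++ [q.1]) else d.insert q.2 [q.1]) e)
      = p.foldl (fun d q => d.modify q.2 [] (fun l => l ++ [q.1])) e := by
  have : (fun (d : PySem.Dict Char (List Int)) (q : Int × Char) =>
      if d.contains q.2 then d.modify q.2 [] (fun l => l ++ [q.1]) else d.insert q.2 [q.1])
      = (fun d q => d.modify q.2 [] (fun l => l ++ [q.1])) := by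
    funext d q; exact stepA_eq d q
  rw [this]

theorem countA_getD (p : List (Int × Char)) (c : Char) :
    ((p.foldl (fun d q => if d.contains q.2 then d.modify q.2 [] (fun l => l ++ [q.1]) else d.insert q.2 [q.1])
        PySem.Dict.empty).getD c []) = posL p c := by
  rw [foldA_eq]
  have := PySem.Dict.getD_foldl_modify_append (p.map Prod.swap) (PySem.Dict.empty) c
  rw [List.foldl_map] at this
  simp only [Prod.snd_swap, Prod.fst_swap] at this
  rw [this]
  simp [posL, List.filter_map, Function.comp_def, PySem.Dict.getD_empty]

theorem countA_keys (p : List (Int × Char)) :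
    (p.foldl (fun d q => if d.contains q.2 then d.modify q.2 [] (fun l => l ++ [q.1]) else d.insert q.2 [q.1])
        PySem.Dict.empty).keys = PySem.Set.ofList (p.map (fun q => q.2)) := by
  rw [foldA_eq]
  have := PySem.Dict.keys_foldl_modify_key p (fun q => q.2) ([] : List Int)
      (fun _ q => fun l => l ++ [q.1]) PySem.Dict.empty
  simpa [PySem.Set.update_nil_left] using this

theorem countA_nodup_keys (p : List (Int × Char)) :
    (p.foldl (fun d q => if d.contains q.2 then d.modify q.2 [] (fun l => l ++ [q.1]) else d.insert q.2 [q.1])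
        PySem.Dict.empty).keys.Nodup := by
  rw [countA_keys]; exact PySem.Set.nodup_ofList _

-- ===== B-side: last-index dict and the lonely set =====

theorem foldB_fst (l : List (Int × Char)) (st : PySem.Dict Char Int × PySem.Set Char) :
    (l.foldl stepB st).1 = l.foldl (fun d q => d.insert q.2 q.1) st.1 := by
  induction l generalizing st with
  | nil => rfl
  | cons q t ih => exact ih (stepB st q)

theorem lastD_getD (l : List (Int × Char)) (c : Char) :
    (l.foldl (fun d q => d.insert q.2 q.1) PySem.Dict.empty).getD c 0 = (posL l c).getLastD 0 := by
  induction l using List.reverseRecOn with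
  | nil => simp [posL, PySem.Dict.getD_empty]
  | append_singleton t q ih =>
    rw [List.foldl_append, List.foldl_cons, List.foldl_nil, posL_append, posL_singleton,
      PySem.Dict.getD_insert]
    by_cases h : c = q.2
    · simp [h]
    · have h2 : ¬ q.2 = c := fun hh => h hh.symm
      simp [h, h2, ih]

theorem lastD_keys (l : List (Int × Char)) :
    (l.foldl (fun d q => d.insert q.2 q.1) PySem.Dict.empty).keys
      = PySem.Set.ofList (l.map (fun q => q.2)) := by
  have := PySem.Dict.keys_foldl_insert_key l (fun q => q.2) (fun _ q => q.1) PySem.Dict.empty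
  simpa [PySem.Set.update_nil_left] using this

theorem lastD_contains (l : List (Int × Char)) (c : Char) :
    (l.foldl (fun d q => d.insert q.2 q.1) PySem.Dict.empty).contains c
      = decide (posL l c ≠ []) := by
  rw [PySem.Dict.contains_eq_decide_mem_keys, lastD_keys]
  simp only [PySem.Set.mem_ofList, ← posL_ne_nil l c]

theorem lonB (l : List (Int × Char)) :
    (l.foldl stepB (PySem.Dict.empty, PySem.Set.empty)).2.Nodup ∧
    ∀ c, (c ∈ (l.foldl stepB (PySem.Dict.empty, PySem.Set.empty)).2 ↔ hasGap (posL l c) = true) := by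
  induction l using List.reverseRecOn with
  | nil =>
    refine ⟨List.nodup_nil, fun c => ?_⟩
    simp [posL, hasGap, PySem.Set.empty]
  | append_singleton t q ih =>
    obtain ⟨hnd, hmem⟩ := ih
    rw [List.foldl_append, List.foldl_cons, List.foldl_nil]
    set st := t.foldl stepB (PySem.Dict.empty, PySem.Set.empty) with hst
    have hfst : st.1 = t.foldl (fun d q => d.insert q.2 q.1) PySem.Dict.empty := foldB_fst t _
    have hcond : (st.1.contains q.2 && decide (1 < q.1 - st.1.getD q.2 0))
        = (decide (posL t q.2 ≠ []) && decide (1 < q.1 - (posL t q.2).getLastD 0)) := by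
      rw [hfst, lastD_contains, lastD_getD]
    constructor
    · show (stepB st q).2.Nodup
      unfold stepB
      by_cases hc : (st.1.contains q.2 && decide (1 < q.1 - st.1.getD q.2 0)) = true
      · simp only [hc, if_true]; exact PySem.Set.nodup_add _ _ hnd
      · simp only [Bool.not_eq_true] at hc; simp only [hc]; simpa using hnd
    · intro c
      show c ∈ (stepB st q).2 ↔ _
      unfold stepB
      rw [posL_append, posL_singleton]
      by_cases hc : (st.1.contains q.2 && decide (1 < q.1 - st.1.getD q.2 0)) = true
      · -- the gap condition fired at this step
        have hc2 := hcond ▸ hc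
        rw [if_pos hc]
        simp only [Bool.and_eq_true, decide_eq_true_eq] at hc2
        by_cases hqc : q.2 = c
        · subst hqc
          rw [if_pos rfl, hasGap_snoc]
          have hie : (posL t q.2).isEmpty = false := by
            simpa [List.isEmpty_iff] using hc2.1
          simp only [PySem.Set.mem_add, hie]
          exact iff_of_true (by simp) (by simp only [Bool.not_false, Bool.true_and,
            decide_eq_true hc2.2, Bool.or_true])
        · rw [if_neg hqc, List.append_nil]
          have hne : ¬ c = q.2 := fun h => hqc h.symm
          simp [PySem.Set.mem_add, hne, hmem c]
      · -- the gap condition did not fire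
        have hc2 := hcond ▸ hc
        simp only [Bool.not_eq_true] at hc hc2
        rw [if_neg (by simp [hc])]
        by_cases hqc : q.2 = c
        · subst hqc
          rw [if_pos rfl, hasGap_snoc]
          have hie : (!(posL t q.2).isEmpty) = decide (posL t q.2 ≠ []) := by
            cases hp : posL t q.2 <;> simp
          rw [hie, hc2]
          simpa using hmem q.2
        · rw [if_neg hqc, List.append_nil]
          exact hmem c

-- ===== assembly =====

theorem answer_list_eq (d : PySem.Dict Char (List Int)) :
    d.items.foldl
      (fun acc kv =>
        if 2 ≤ kv.2.length then
          if (PySem.List.pyRange 0 ((kv.2.length : Int) - 1) 1).any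
              (fun i => decide (1 < (PySem.List.pyGetD kv.2 i 0 - PySem.List.pyGetD kv.2 (i + 1) 0).natAbs)) then
            acc ++ [kv.1]
          else acc
        else acc)
      ([] : List Char)
      = ((d.items.filter (fun kv => condA kv.2)).map (fun kv => kv.1)) := by
  have hfun : (fun (acc : List Char) (kv : Char × List Int) =>
      if 2 ≤ kv.2.length then
        if (PySem.List.pyRange 0 ((kv.2.length : Int) - 1) 1).any
            (fun i => decide (1 < (PySem.List.pyGetD kv.2 i 0 - PySem.List.pyGetD kv.2 (i + 1) 0).natAbs)) then
          acc ++ [kv.1]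
        else acc
      else acc)
      = (fun acc kv => if condA kv.2 = true then acc ++ [kv.1] else acc) := by
    funext acc kv
    by_cases h1 : 2 ≤ kv.2.length
    · by_cases h2 : (PySem.List.pyRange 0 ((kv.2.length : Int) - 1) 1).any
          (fun i => decide (1 < (PySem.List.pyGetD kv.2 i 0 - PySem.List.pyGetD kv.2 (i + 1) 0).natAbs)) = true
      · simp [h1, h2, condA]
      · simp only [Bool.not_eq_true] at h2
        simp [h1, h2, condA]
    · simp [h1, condA]
  rw [hfun, PySem.List.foldl_append_if (fun kv => condA kv.2) (fun kv => kv.1) d.items []]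
  simp

theorem solution_spec_aux (s : String) : solution s = solution_alt s := by
  set p := PySem.List.enumerate s.toList 0 with hp
  -- A's answer list
  set d := p.foldl
    (fun d q => if d.contains q.2 then d.modify q.2 [] (fun l => l ++ [q.1]) else d.insert q.2 [q.1])
    PySem.Dict.empty with hd
  set answerA := ((d.items.filter (fun kv => condA kv.2)).map (fun kv => kv.1)) with ha
  -- B's lonely set
  set lonely := (p.foldl stepB (PySem.Dict.empty, PySem.Set.empty)).2 with hl
  have hsolA : solution s = (if answerA.length = 0 then "N"
      else String.ofList (PySem.List.sorted answerA (fun x => x) false)) := by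
    rw [ha]
    rw [← answer_list_eq d]
    rfl
  have hsolB : solution_alt s = (if lonely = [] then "N"
      else String.ofList (PySem.List.sorted lonely (fun x => x) false)) := by
    rfl
  -- positions of any character are strictly increasing
  have hposPW : ∀ c, (posL p c).Pairwise (· < ·) := by
    intro c
    have h1 : p.Pairwise (fun a b => a.1 < b.1) := PySem.List.pairwise_lt_enumerate _ _
    have h2 : (p.filter (fun q => q.2 == c)).Pairwise (fun a b => a.1 < b.1) :=
      h1.sublist (List.filter_sublist)
    unfold posL
    exact (List.pairwise_map).mpr h2
  -- membership in A's answer list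
  have hmemA : ∀ c, c ∈ answerA ↔ hasGap (posL p c) = true := by
    intro c
    rw [ha]
    simp only [List.mem_map, List.mem_filter]
    constructor
    · rintro ⟨kv, ⟨hmem, hcond⟩, rfl⟩
      have hget : d.get? kv.1 = some kv.2 :=
        (PySem.Dict.get?_eq_some_iff_mem_items d kv.1 kv.2 (by rw [hd]; exact countA_nodup_keys p)).mpr hmem
      have hgetD : d.getD kv.1 [] = kv.2 := by rw [PySem.Dict.getD, hget]; rfl
      have hv : kv.2 = posL p kv.1 := by rw [← hgetD, hd]; exact countA_getD p kv.1
      rw [← condA_eq_hasGap _ (hposPW kv.1), ← hv]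
      exact hcond
    · intro hg
      have hne : posL p c ≠ [] := by
        intro hnil
        rw [hnil] at hg
        simp [hasGap] at hg
      have hck : c ∈ d.keys := by
        rw [hd, countA_keys, PySem.Set.mem_ofList, ← posL_ne_nil]
        exact hne
      have hget : d.get? c = some (d.getD c []) := by
        rcases hq : d.get? c with _ | w
        · exact absurd ((PySem.Dict.get?_eq_none_iff_not_mem_keys d c).mp hq) (by simpa using hck)
        · rw [PySem.Dict.getD, hq]; rfl
      have hgetD : d.getD c [] = posL p c := by rw [hd]; exact countA_getD p c
      refine ⟨(c, d.getD c []), ⟨?_, ?_⟩, rfl⟩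
      · exact (PySem.Dict.get?_eq_some_iff_mem_items d c _ (by rw [hd]; exact countA_nodup_keys p)).mp hget
      · rw [hgetD, condA_eq_hasGap _ (hposPW c)]
        exact hg
  -- A's answer list has no duplicates
  have hndA : answerA.Nodup := by
    have hsub : answerA.Sublist d.keys := by
      rw [ha]
      have : d.keys = d.items.map (fun kv => kv.1) := by
        simp [PySem.Dict.keys]
      rw [this]
      exact List.filter_sublist.map _
    exact hsub.nodup (by rw [hd]; exact countA_nodup_keys p)
  obtain ⟨hndB, hmemB⟩ := lonB p
  rw [← hl] at hndB hmemB
  -- the two lists are permutations of each other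
  have hperm : answerA.Perm lonely := by
    rw [List.perm_ext_iff_of_nodup hndA hndB]
    intro c
    rw [hmemA c, hmemB c]
  rw [hsolA, hsolB]
  by_cases hnil : answerA.length = 0
  · have : lonely = [] := by
      have h0 : answerA = [] := List.length_eq_zero_iff.mp hnil
      rw [h0] at hperm
      exact hperm.symm.eq_nil
    rw [if_pos hnil, if_pos this]
  · have hlon : ¬ lonely = [] := by
      intro h0
      rw [h0] at hperm
      exact hnil (by simpa using hperm.eq_nil)
    rw [if_neg hnil, if_neg hlon]
    congr 1
    exact PySem.List.sorted_id_eq_sorted_id_iff_perm answerA lonely |>.mpr hperm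

-- ===== VERDICT (by name: the statement is the Claim_ definition above) =====
theorem solution_spec : Claim_equal_solution := by
  intro s _
  unfold Spec_solution
  exact solution_spec_aux s
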